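-- pv_equiv track=rewrite | github.com/yasen-sotirov/TOOLS_ | 32_Recursion/exercise/08_count_2.py | count_oc
-- ===== SOURCE A (Python) =====
-- def count_oc(nums):
--     if not nums:
--         return 0
--     first, *rest = nums
--
--     if not rest:
--         return int(first == "8")
--
--     if first == "8" and rest[0] == "8":
--         return 2 + count_oc(rest)
--     if first == "8":
--         return 1 + count_oc(rest)
--
--     return count_oc(rest)
-- ===== SOURCE B (Python) =====
-- def count_oc(nums):
--     total = nums.count("8")
--     pairs = sum(1 for a, b in zip(nums, nums[1:]) if a == "8" and b == "8")
--     return total + pairs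
-- ===== Notes on version B (the rewrite author's own statement) =====
-- stated objective: faster
-- what changed: Replaces the head/tail recursion (whose 'first, *rest' unpacking copies the remaining string each call) with two flat non-recursive passes: a builtin count of the eight character plus a pairwise zip counting adjacent pairs of eights.
import Mathlib
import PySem

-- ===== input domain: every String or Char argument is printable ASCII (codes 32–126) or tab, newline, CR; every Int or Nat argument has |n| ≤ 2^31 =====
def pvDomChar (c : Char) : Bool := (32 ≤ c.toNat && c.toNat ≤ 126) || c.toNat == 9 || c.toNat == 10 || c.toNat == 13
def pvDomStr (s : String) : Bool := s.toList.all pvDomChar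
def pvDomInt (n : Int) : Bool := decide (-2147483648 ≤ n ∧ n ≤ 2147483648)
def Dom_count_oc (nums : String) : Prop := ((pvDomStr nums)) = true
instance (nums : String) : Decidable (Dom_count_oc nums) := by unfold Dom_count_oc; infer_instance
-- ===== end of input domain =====

-- B replaces A's interleaved head/tail recursion by two flat passes: a builtin substring count of "8" plus a pairwise zip over consecutive pairs (objective: simpler).


-- ===== PORT A =====
-- literal transliteration of A's recursion over the characters of nums
def count_oc_rec : List Char → Int
  | [] => 0                                   -- if not nums: return 0
  | [first] => if first = '8' then 1 else 0   -- if not rest: return int(first == "8")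
  | first :: d :: rest =>
    if first = '8' ∧ d = '8' then 2 + count_oc_rec (d :: rest)
    else if first = '8' then 1 + count_oc_rec (d :: rest)
    else count_oc_rec (d :: rest)

def count_oc (nums : String) : Int := count_oc_rec nums.toList

-- ===== PORT B =====
-- total = nums.count("8"); pairs = sum(1 for a,b in zip(nums, nums[1:]) if a=="8" and b=="8")
def count_oc_alt (nums : String) : Int :=
  let total : Int := (PySem.Str.count nums "8" : Int)
  let pairs : Int :=
    (nums.toList.zip (PySem.Str.slice nums (some 1) none).toList).foldl
      (fun acc ab => if ab.1 = '8' ∧ ab.2 = '8' then acc + 1 else acc) 0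
  total + pairs

-- ===== PRECONDITION & SPEC =====
def Spec_count_oc (nums : String) (out : Int) : Prop := out = count_oc_alt nums
instance (nums : String) (out : Int) : Decidable (Spec_count_oc nums out) := by unfold Spec_count_oc; infer_instance

-- ===== CLAIM (what is proved, stated in full; the proofs are below) =====
def Claim_equal_count_oc : Prop := ∀ (nums : String), Dom_count_oc nums → Spec_count_oc nums (count_oc nums)

-- ===== LEMMAS AND PROOFS =====

-- PySem's substring count of the one-character pattern "8" is the character count.
theorem count_go_eight (fuel : Nat) : ∀ (l : List Char) (acc : Nat), l.length ≤ fuel →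
    PySem.Chars.count.go ['8'] fuel l acc = acc + l.count '8' := by
  induction fuel with
  | zero =>
    intro l acc h
    have : l = [] := by cases l <;> simp_all
    subst this; simp [PySem.Chars.count.go]
  | succ n ih =>
    intro l acc h
    cases l with
    | nil => simp [PySem.Chars.count.go]
    | cons c t =>
      rw [PySem.Chars.count.go]
      by_cases hc : c = '8'
      · subst hc
        simp only [List.isPrefixOf, List.count_cons]
        simp [ih t _ (by simpa using h)]
        ring
      · have hpre : List.isPrefixOf ['8'] (c :: t) = false := by
          simp [List.isPrefixOf]; intro hq; exact absurd hq.symm hc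
        simp [hpre, hc, ih t _ (by simpa using h)]

theorem count_eight (l : List Char) : PySem.Chars.count l ['8'] = l.count '8' := by
  simp [PySem.Chars.count, count_go_eight l.length l 0 le_rfl]

-- A's recursion computes char-count of '8' plus the number of adjacent ('8','8') pairs.
theorem count_oc_rec_eq (l : List Char) :
    count_oc_rec l =
      (l.count '8' : Int) + ((l.zip (l.drop 1)).countP (fun ab => ab.1 = '8' ∧ ab.2 = '8') : Int) := by
  induction l with
  | nil => simp [count_oc_rec]
  | cons c t ih =>
    cases t with
    | nil => by_cases hc : c = '8' <;> simp [count_oc_rec, hc]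
    | cons d r =>
      rw [count_oc_rec, ih]
      simp only [List.drop, List.zip_cons_cons, List.countP_cons, List.count_cons]
      split_ifs <;> simp_all <;> omega

-- nums[1:] on a string is drop 1 on the character list.
theorem slice_one (l : List Char) : PySem.List.slice l (some 1) none = l.drop 1 := by
  simpa using PySem.List.slice_from l (by norm_num : (0:Int) ≤ 1)

-- ===== VERDICT (by name: the statement is the Claim_ definition above) =====
theorem count_oc_spec : Claim_equal_count_oc := by
  intro nums _
  unfold Spec_count_oc count_oc count_oc_alt
  rw [count_oc_rec_eq]
  simp only [PySem.Str.count_eq, PySem.Str.toList_slice, PySem.Chars.slice_eq_listSlice,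
    slice_one]
  have h8 : "8".toList = ['8'] := rfl
  rw [PySem.List.foldl_ite_add_one, h8, count_eight]
  omega
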